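-- pv_equiv track=rewrite | github.com/chzosia/MultipleSequenceAlignment | MSA.py | merge_alignments
-- ===== SOURCE A (Python) =====
-- def merge_alignments(msa, aligned_center, aligned_seq):
--     """
--     Merges a newly aligned sequence into the existing MSA using the aligned center sequence
--     as reference for insertion of gaps.
--
--     Args:
--         msa (list): Current multiple sequence alignment list.
--         aligned_center (str): Aligned center sequence from the latest pairwise alignment.
--         aligned_seq (str): Newly aligned sequence to add to the MSA.
--
--     Returns:
--         list: Updated MSA with the new sequence included.
--     """
--     new_msa = []
--
--     for seq in msa:
--         new_seq = ""
--         index = 0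
--         for i in range(len(aligned_center)):
--             if aligned_center[i] == '-':
--                 new_seq += '-'
--             else:
--                 new_seq += seq[index]
--                 index += 1
--         new_msa.append(new_seq)
--
--     new_msa.append(aligned_seq)
--
--     max_len = max(len(seq) for seq in new_msa)
--     new_msa = [seq.ljust(max_len, '-') for seq in new_msa]
--
--     return new_msa
-- ===== SOURCE B (Python) =====
-- def merge_alignments(msa, aligned_center, aligned_seq):
--     # Scatter decomposition: precompute the non-gap column positions of the
--     # aligned center once, then fill a '-' template row per sequence.
--     positions = [i for i, c in enumerate(aligned_center) if c != '-']
--     n = len(aligned_center)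
--     new_msa = []
--     for seq in msa:
--         row = ['-'] * n
--         for j, pos in enumerate(positions):
--             row[pos] = seq[j]
--         new_msa.append(''.join(row))
--     new_msa.append(aligned_seq)
--     width = max(len(s) for s in new_msa)
--     return [s + '-' * (width - len(s)) for s in new_msa]
-- ===== Notes on version B (the rewrite author's own statement) =====
-- stated objective: alternative
-- what changed: Replaces the per-column branch with a running input index by precomputing the non-gap column positions once and scattering each sequence's characters into a '-' template row; padding is done by concatenation instead of ljust.
import Mathlib
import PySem

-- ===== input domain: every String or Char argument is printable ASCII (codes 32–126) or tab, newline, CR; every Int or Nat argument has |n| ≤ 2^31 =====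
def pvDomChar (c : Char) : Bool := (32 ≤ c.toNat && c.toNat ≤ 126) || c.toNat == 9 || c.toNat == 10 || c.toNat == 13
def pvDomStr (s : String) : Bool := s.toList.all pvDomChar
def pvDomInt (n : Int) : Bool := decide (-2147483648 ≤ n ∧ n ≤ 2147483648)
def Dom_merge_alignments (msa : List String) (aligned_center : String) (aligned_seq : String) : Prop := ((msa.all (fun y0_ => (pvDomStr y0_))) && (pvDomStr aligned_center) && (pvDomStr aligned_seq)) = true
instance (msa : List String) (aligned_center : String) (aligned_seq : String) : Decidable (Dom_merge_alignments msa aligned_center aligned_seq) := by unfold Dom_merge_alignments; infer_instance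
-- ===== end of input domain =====

-- B precomputes the non-gap column positions of the aligned center once and scatters each
-- sequence's characters into a '-' template row, instead of A's per-column branch with a
-- running input index; same cost ('alternative').  RETURN-value equivalence only (no
-- observable mutation in either program).

-- ===== PORT A =====
-- seq[index] (Python: raises when out of range) is ported as List.getD under
-- Pre_merge_alignments, which guarantees the index is in range (= PySem.List.pyGetD
-- at a nonnegative in-range index, cf. PySem.List.pyGetD_natCast).
def pvRowA (seq : List Char) (center : List Char) : List Char :=
  (center.foldl
    (fun (st : List Char × Nat) c =>
      if c = '-' then (st.1 ++ ['-'], st.2)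
      else (st.1 ++ [seq.getD st.2 '-'], st.2 + 1))
    ([], 0)).1

-- s.ljust(m, '-')  (exact: pads on the right, returns s unchanged when len s ≥ m)
def pvLjust (s : List Char) (m : Nat) : List Char :=
  s ++ List.replicate (m - s.length) '-'

def merge_alignments (msa : List String) (aligned_center : String) (aligned_seq : String) : List String :=
  let newMsa : List (List Char) :=
    msa.map (fun s => pvRowA s.toList aligned_center.toList) ++ [aligned_seq.toList]
  -- max(len(seq) for seq in new_msa): the running-max loop over a nonempty list
  -- (newMsa always ends with aligned_seq, so the [] branch is unreachable)
  let maxLen : Nat :=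
    match newMsa.map List.length with
    | [] => 0
    | l :: ls => ls.foldl max l
  newMsa.map (fun r => String.ofList (pvLjust r maxLen))

-- ===== PORT B =====
-- enumerate(xs) with Nat indices (exact: Python's indices here are nonnegative)
def pvEnum {α : Type} (k : Nat) : List α → List (Nat × α)
  | [] => []
  | x :: xs => (k, x) :: pvEnum (k + 1) xs

-- row[pos] = seq[j]: pos is an in-range index into row (a non-gap column of the
-- center), so Python's list assignment is List.set; seq[j] as in port A.
def pvRowB (seq : List Char) (positions : List Nat) (n : Nat) : List Char :=
  (pvEnum 0 positions).foldl
    (fun row jp => row.set jp.2 (seq.getD jp.1 '-'))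
    (List.replicate n '-')

def merge_alignments_alt (msa : List String) (aligned_center : String) (aligned_seq : String) : List String :=
  let positions : List Nat :=
    ((pvEnum 0 aligned_center.toList).filter (fun p => p.2 ≠ '-')).map Prod.fst
  let n : Nat := aligned_center.toList.length
  let newMsa : List (List Char) :=
    msa.map (fun s => pvRowB s.toList positions n) ++ [aligned_seq.toList]
  let width : Nat :=
    match newMsa.map List.length with
    | [] => 0
    | l :: ls => ls.foldl max l
  newMsa.map (fun r => String.ofList (r ++ List.replicate (width - r.length) '-'))

-- ===== PRECONDITION & SPEC =====
-- Pre_ excludes exactly the inputs where Python A raises IndexError: a sequence in msa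
-- shorter than the number of non-gap columns of aligned_center.
def Pre_merge_alignments (msa : List String) (aligned_center : String) (aligned_seq : String) : Prop :=
  ∀ q ∈ msa, (aligned_center.toList.filter (fun ch => ch ≠ '-')).length ≤ q.toList.length
instance (msa : List String) (aligned_center : String) (aligned_seq : String) : Decidable (Pre_merge_alignments msa aligned_center aligned_seq) := by unfold Pre_merge_alignments; infer_instance

def pvWitness_merge_alignments : List String × String × String := (["AB", "CDE"], "A-B", "XY-Z")

def Spec_merge_alignments (msa : List String) (aligned_center : String) (aligned_seq : String) (out : List String) : Prop := out = merge_alignments_alt msa aligned_center aligned_seq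
instance (msa : List String) (aligned_center : String) (aligned_seq : String) (out : List String) : Decidable (Spec_merge_alignments msa aligned_center aligned_seq out) := by unfold Spec_merge_alignments; infer_instance

-- ===== CLAIM (what is proved, stated in full; the proofs are below) =====
def Claim_equal_merge_alignments : Prop := ∀ (msa : List String) (aligned_center : String) (aligned_seq : String), Dom_merge_alignments msa aligned_center aligned_seq → Pre_merge_alignments msa aligned_center aligned_seq → Spec_merge_alignments msa aligned_center aligned_seq (merge_alignments msa aligned_center aligned_seq)

-- ===== LEMMAS AND PROOFS =====

-- the common characterisation of one merged row: per column, '-' for a gap,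
-- otherwise the getter applied to the running non-gap rank
def pvRowSpec : List Char → (Nat → Char) → List Char
  | [], _ => []
  | c :: cs, g => if c = '-' then '-' :: pvRowSpec cs g else g 0 :: pvRowSpec cs (fun j => g (j + 1))

theorem pvEnum_succ {α : Type} (k : Nat) (xs : List α) :
    pvEnum (k + 1) xs = (pvEnum k xs).map (fun p => (p.1 + 1, p.2)) := by
  induction xs generalizing k with
  | nil => rfl
  | cons x xs ih => simp [pvEnum, ih]

-- positions of the tail, enumerated one later, are the positions enumerated one earlier shifted by one
theorem pvPos_shift (cs : List Char) (k : Nat) :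
    (((pvEnum (k + 1) cs).filter (fun p => p.2 ≠ '-')).map Prod.fst)
      = ((((pvEnum k cs).filter (fun p => p.2 ≠ '-')).map Prod.fst)).map (· + 1) := by
  rw [pvEnum_succ]
  simp [List.filter_map, List.map_map, Function.comp_def]

-- scattering into indices all shifted by one leaves the head of the row untouched
theorem pvScatter_mapped (g : Nat → Char) (ps : List Nat) (k : Nat) (x : Char) (row : List Char) :
    (pvEnum k (ps.map (· + 1))).foldl (fun r jp => r.set jp.2 (g jp.1)) (x :: row)
      = x :: (pvEnum k ps).foldl (fun r jp => r.set jp.2 (g jp.1)) row := by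
  induction ps generalizing k row with
  | nil => rfl
  | cons p ps ih => simp [pvEnum, ih]

-- starting the enumeration one later = shifting the getter
theorem pvEnum_getter (g : Nat → Char) (ps : List Nat) (k : Nat) (row : List Char) :
    (pvEnum (k + 1) ps).foldl (fun r jp => r.set jp.2 (g jp.1)) row
      = (pvEnum k ps).foldl (fun r jp => r.set jp.2 (g (jp.1 + 1))) row := by
  induction ps generalizing k row with
  | nil => rfl
  | cons p ps ih => simp only [pvEnum, List.foldl_cons]; exact ih (k + 1) _

-- the scatter loop of B computes pvRowSpec
theorem pvRowB_spec (cs : List Char) (g : Nat → Char) :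
    (pvEnum 0 (((pvEnum 0 cs).filter (fun p => p.2 ≠ '-')).map Prod.fst)).foldl
        (fun row jp => row.set jp.2 (g jp.1)) (List.replicate cs.length '-')
      = pvRowSpec cs g := by
  induction cs generalizing g with
  | nil => rfl
  | cons c cs ih =>
    have hpos := pvPos_shift cs 0
    rw [show (0 : Nat) + 1 = 1 from rfl] at hpos
    by_cases hc : c = '-'
    · subst hc
      rw [show pvEnum 0 ('-' :: cs) = ((0 : Nat), '-') :: pvEnum 1 cs from rfl,
        List.filter_cons_of_neg (by simp), hpos,
        show List.replicate ('-' :: cs).length '-' = '-' :: List.replicate cs.length '-' from rfl,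
        pvScatter_mapped g _ 0 '-' _, ih g]
      simp [pvRowSpec]
    · rw [show pvEnum 0 (c :: cs) = ((0 : Nat), c) :: pvEnum 1 cs from rfl,
        List.filter_cons_of_pos (by simpa using hc)]
      simp only [List.map_cons]
      rw [hpos]
      rw [show pvEnum 0 ((0 : Nat) :: _) = ((0 : Nat), (0 : Nat)) :: pvEnum 1 ((((pvEnum 0 cs).filter (fun p => p.2 ≠ '-')).map Prod.fst).map (· + 1)) from rfl]
      simp only [List.foldl_cons, List.length_cons, List.replicate_succ, List.set_cons_zero]
      rw [pvScatter_mapped g _ 1 (g 0) _, pvEnum_getter g _ 0 _, ih (fun j => g (j + 1))]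
      simp [pvRowSpec, hc]

-- the per-column loop of A computes pvRowSpec (generalised over accumulator and running index)
theorem pvRowA_spec_aux (cs : List Char) (seq : List Char) (acc : List Char) (idx : Nat) :
    (cs.foldl
      (fun (st : List Char × Nat) c =>
        if c = '-' then (st.1 ++ ['-'], st.2)
        else (st.1 ++ [seq.getD st.2 '-'], st.2 + 1))
      (acc, idx)).1
      = acc ++ pvRowSpec cs (fun j => seq.getD (idx + j) '-') := by
  induction cs generalizing acc idx with
  | nil => simp [pvRowSpec]
  | cons c cs ih =>
    simp only [List.foldl_cons, pvRowSpec]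
    by_cases hc : c = '-'
    · rw [if_pos hc, if_pos hc, ih]
      simp
    · rw [if_neg hc, if_neg hc, ih]
      have h : (fun j => seq.getD (idx + 1 + j) '-') = (fun j => seq.getD (idx + (j + 1)) '-') := by
        funext j; congr 1; omega
      rw [h]
      simp

theorem pvRow_eq (seq cs : List Char) :
    pvRowA seq cs
      = pvRowB seq (((pvEnum 0 cs).filter (fun p => p.2 ≠ '-')).map Prod.fst) cs.length := by
  unfold pvRowA pvRowB
  rw [pvRowA_spec_aux cs seq [] 0, pvRowB_spec cs (fun j => seq.getD j '-')]
  simp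

-- ===== VERDICT (by name: the statement is the Claim_ definition above) =====
theorem merge_alignments_spec : Claim_equal_merge_alignments := by
  intro msa aligned_center aligned_seq _ _
  unfold Spec_merge_alignments merge_alignments merge_alignments_alt
  simp only [pvRow_eq, pvLjust]
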